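-- pv_equiv track=rewrite | github.com/Arpanmukherjee3110/Sorting-list-of-string-based-on-last-character | Sorting_string_last_char.py | func
-- ===== SOURCE A (Python) =====
-- def func(s1,s2):
--   ln=min(len(s1),len(s2))
--   s=""
--   while(ln>0):
--     ln=ln-1
--     m=ord(s1[ln])
--     n=ord(s2[ln])
--     if m<n:
--       s=s1
--       break
--     if n<m:
--       s=s2
--       break
--     if n==m:
--       continue
--   if len(s)==0 and len(s1)==len(s2):
--     s=s1
--   if len(s)==0 and len(s1)!=len(s2):
--     if len(s1)>len(s2):
--       s=s1
--     if len(s1)<len(s2):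
--       s=s2
--   return s
-- ===== SOURCE B (Python) =====
-- def func(s1, s2):
--     ln = min(len(s1), len(s2))
--     a = s1[:ln][::-1]
--     b = s2[:ln][::-1]
--     if a < b:
--         return s1
--     if a > b:
--         return s2
--     return s1 if len(s1) >= len(s2) else s2
-- ===== Notes on version B (the rewrite author's own statement) =====
-- stated objective: simpler
-- what changed: Replaces the explicit back-to-front ord-comparison while loop with a single built-in lexicographic comparison of the reversed shared prefixes, plus a one-line length tiebreak.
import Mathlib
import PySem

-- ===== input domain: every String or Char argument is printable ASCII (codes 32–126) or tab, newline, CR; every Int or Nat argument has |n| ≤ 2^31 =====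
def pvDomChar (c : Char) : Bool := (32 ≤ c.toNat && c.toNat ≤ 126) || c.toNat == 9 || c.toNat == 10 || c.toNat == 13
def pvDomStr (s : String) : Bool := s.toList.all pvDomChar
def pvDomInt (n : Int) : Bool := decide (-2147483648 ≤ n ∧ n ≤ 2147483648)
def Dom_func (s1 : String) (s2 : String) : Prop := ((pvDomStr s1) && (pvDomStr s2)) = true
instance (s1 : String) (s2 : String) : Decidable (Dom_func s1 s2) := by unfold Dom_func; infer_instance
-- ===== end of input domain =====

-- B replaces A's explicit back-to-front ord-comparison loop by one lexicographic
-- comparison of the reversed shared prefixes (objective: simpler).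

-- ===== PORT A =====
-- the while loop: ln counts down; compares ord(s1[ln]) vs ord(s2[ln]) after the decrement.
-- the index ln is always in range (ln < min of the lengths), so pyGetD's default is never used.
def funcLoop (s1 s2 : String) : Nat → String
  | 0 => ""
  | Nat.succ ln =>
    let m := (PySem.List.pyGetD s1.toList ((ln : Nat) : Int) ' ').toNat
    let n := (PySem.List.pyGetD s2.toList ((ln : Nat) : Int) ' ').toNat
    if m < n then s1
    else if n < m then s2
    else funcLoop s1 s2 ln

def func (s1 : String) (s2 : String) : String :=
  let ln := min s1.toList.length s2.toList.length
  let s := funcLoop s1 s2 ln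
  if s.toList.length = 0 ∧ s1.toList.length = s2.toList.length then s1
  else if s.toList.length = 0 ∧ s1.toList.length ≠ s2.toList.length then
    (if s1.toList.length > s2.toList.length then s1
     else if s1.toList.length < s2.toList.length then s2
     else s)
  else s

-- ===== PORT B =====
-- Python's built-in string '<' (lexicographic by code point), on List Char
def lexLt : List Char → List Char → Bool
  | _, [] => false
  | [], _ :: _ => true
  | c :: cs, d :: ds => if c < d then true else if d < c then false else lexLt cs ds

def func_alt (s1 : String) (s2 : String) : String :=
  let ln := min s1.toList.length s2.toList.length
  let a := (s1.toList.take ln).reverse   -- s1[:ln][::-1]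
  let b := (s2.toList.take ln).reverse   -- s2[:ln][::-1]
  if lexLt a b then s1
  else if lexLt b a then s2
  else if s2.toList.length ≤ s1.toList.length then s1 else s2

-- ===== PRECONDITION & SPEC =====
def Spec_func (s1 : String) (s2 : String) (out : String) : Prop := out = func_alt s1 s2
instance (s1 : String) (s2 : String) (out : String) : Decidable (Spec_func s1 s2 out) := by unfold Spec_func; infer_instance

-- ===== CLAIM (what is proved, stated in full; the proofs are below) =====
def Claim_equal_func : Prop := ∀ (s1 : String) (s2 : String), Dom_func s1 s2 → Spec_func s1 s2 (func s1 s2)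

-- ===== LEMMAS AND PROOFS =====

theorem charLt_iff (c d : Char) : c < d ↔ c.toNat < d.toNat := by
  rw [Char.lt_def, UInt32.lt_iff_toNat_lt]
  exact Iff.rfl

theorem take_succ_reverse (l : List Char) (n : Nat) (h : n < l.length) :
    (l.take (n + 1)).reverse = l[n] :: (l.take n).reverse := by
  rw [List.take_add_one]
  simp [List.getElem?_eq_getElem h]

theorem lexLt_nil_nil : lexLt [] [] = false := rfl

theorem funcLoop_eq_lex (s1 s2 : String) (ln : Nat)
    (h1 : ln ≤ s1.toList.length) (h2 : ln ≤ s2.toList.length) :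
    funcLoop s1 s2 ln =
      (if lexLt ((s1.toList.take ln).reverse) ((s2.toList.take ln).reverse) then s1
       else if lexLt ((s2.toList.take ln).reverse) ((s1.toList.take ln).reverse) then s2
       else "") := by
  induction ln with
  | zero => simp [funcLoop, lexLt_nil_nil]
  | succ n ih =>
    have hn1 : n < s1.toList.length := by omega
    have hn2 : n < s2.toList.length := by omega
    rw [take_succ_reverse _ _ hn1, take_succ_reverse _ _ hn2]
    show (let m := (PySem.List.pyGetD s1.toList ((n : Nat) : Int) ' ').toNat;
          let k := (PySem.List.pyGetD s2.toList ((n : Nat) : Int) ' ').toNat;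
          if m < k then s1 else if k < m then s2 else funcLoop s1 s2 n) = _
    have g1 : PySem.List.pyGetD s1.toList ((n : Nat) : Int) ' ' = s1.toList[n] := by
      simp [PySem.List.pyGetD_natCast, List.getD_eq_getElem?_getD, List.getElem?_eq_getElem hn1]
    have g2 : PySem.List.pyGetD s2.toList ((n : Nat) : Int) ' ' = s2.toList[n] := by
      simp [PySem.List.pyGetD_natCast, List.getD_eq_getElem?_getD, List.getElem?_eq_getElem hn2]
    simp only [g1, g2]
    rw [ih (by omega) (by omega)]
    by_cases hlt : s1.toList[n] < s2.toList[n]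
    · have : s1.toList[n].toNat < s2.toList[n].toNat := (charLt_iff _ _).mp hlt
      simp [lexLt, hlt, this]
    · by_cases hgt : s2.toList[n] < s1.toList[n]
      · have h' : s2.toList[n].toNat < s1.toList[n].toNat := (charLt_iff _ _).mp hgt
        have hnlt : ¬ s1.toList[n].toNat < s2.toList[n].toNat := by omega
        simp [lexLt, hlt, hgt, h', hnlt]
      · have e1 : ¬ s1.toList[n].toNat < s2.toList[n].toNat := fun h =>
          hlt ((charLt_iff _ _).mpr h)
        have e2 : ¬ s2.toList[n].toNat < s1.toList[n].toNat := fun h =>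
          hgt ((charLt_iff _ _).mpr h)
        simp [lexLt, hlt, hgt, e1, e2]

-- a winner chosen in the loop is nonempty (the loop ran at least once, so min length ≥ 1)
theorem lexLt_take_ne (s1 s2 : String)
    (h : lexLt ((s1.toList.take (min s1.toList.length s2.toList.length)).reverse)
               ((s2.toList.take (min s1.toList.length s2.toList.length)).reverse) = true) :
    0 < min s1.toList.length s2.toList.length := by
  by_contra hn
  have h0 : min s1.toList.length s2.toList.length = 0 := by omega
  rw [h0] at h
  simp [lexLt_nil_nil] at h

-- ===== VERDICT (by name: the statement is the Claim_ definition above) =====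
theorem func_spec : Claim_equal_func := by
  intro s1 s2 _
  show func s1 s2 = func_alt s1 s2
  simp only [func, func_alt]
  rw [funcLoop_eq_lex s1 s2 (min s1.toList.length s2.toList.length)
        (Nat.min_le_left _ _) (Nat.min_le_right _ _)]
  by_cases hab : lexLt ((s1.toList.take (min s1.toList.length s2.toList.length)).reverse)
      ((s2.toList.take (min s1.toList.length s2.toList.length)).reverse) = true
  · have hpos : 0 < min s1.toList.length s2.toList.length := lexLt_take_ne s1 s2 hab
    rw [if_pos hab, if_pos hab]
    have hne1 : ¬ (s1.toList.length = 0 ∧ s1.toList.length = s2.toList.length) := by omega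
    have hne2 : ¬ (s1.toList.length = 0 ∧ s1.toList.length ≠ s2.toList.length) := by omega
    rw [if_neg hne1, if_neg hne2]
  · by_cases hba : lexLt ((s2.toList.take (min s1.toList.length s2.toList.length)).reverse)
        ((s1.toList.take (min s1.toList.length s2.toList.length)).reverse) = true
    · have hpos : 0 < min s1.toList.length s2.toList.length := by
        by_contra hn
        have h0 : min s1.toList.length s2.toList.length = 0 := by omega
        rw [h0] at hba
        simp [lexLt_nil_nil] at hba
      rw [if_neg hab, if_pos hba, if_neg hab, if_pos hba]
      have hne1 : ¬ (s2.toList.length = 0 ∧ s1.toList.length = s2.toList.length) := by omega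
      have hne2 : ¬ (s2.toList.length = 0 ∧ s1.toList.length ≠ s2.toList.length) := by omega
      rw [if_neg hne1, if_neg hne2]
    · rw [if_neg hab, if_neg hba, if_neg hab, if_neg hba]
      have h0 : ("" : String).toList.length = 0 := by decide
      by_cases he : s1.toList.length = s2.toList.length
      · rw [if_pos ⟨h0, he⟩, if_pos (by omega)]
      · rw [if_neg (by omega), if_pos ⟨h0, he⟩]
        by_cases hgt : s1.toList.length > s2.toList.length
        · rw [if_pos hgt, if_pos (by omega)]
        · rw [if_neg hgt, if_pos (by omega), if_neg (by omega)]
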